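-- pv_equiv track=rewrite | github.com/mingyeongho/Algorithm | 프로그래머스/3/42579. 베스트앨범/베스트앨범.py | solution
-- ===== SOURCE A (Python) =====
-- from collections import defaultdict
--
-- def solution(genres, plays):
--     dic = defaultdict(list)
--     play_dic = defaultdict(int)
--     for i in range(len(genres)):
--         dic[genres[i]].append((plays[i], i))
--         play_dic[genres[i]] += plays[i]
--
--     sorted_genres = sorted(play_dic.keys(), key=lambda x: play_dic[x], reverse=True)
--     answer = []
--
--     for genre in sorted_genres:
--         dic[genre].sort(key=lambda x: (-x[0], x[1]))
--         for _, idx in dic[genre][:2]: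
--             answer.append(idx)
--
--     return answer
-- ===== SOURCE B (Python) =====
-- def solution(genres, plays):
--     # One global sort instead of per-genre sorts: rank genres by total plays,
--     # flatten every song to a (genre_rank, -play, index) triple, sort the whole
--     # list once, then a single counting sweep keeps at most 2 songs per rank.
--     totals = {}
--     for g, p in zip(genres, plays):
--         totals[g] = totals.get(g, 0) + p
--     order = sorted(totals.keys(), key=lambda g: totals[g], reverse=True)
--     rank = {g: r for r, g in enumerate(order)}
--     items = [(rank[g], -p, i) for i, (g, p) in enumerate(zip(genres, plays))]
--     items.sort()
--     answer = []
--     taken = {}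
--     for r, _, i in items:
--         c = taken.get(r, 0)
--         if c < 2:
--             answer.append(i)
--             taken[r] = c + 1
--     return answer
-- ===== Notes on version B (the rewrite author's own statement) =====
-- stated objective: alternative
-- what changed: A sorts each genre's song list separately and concatenates the top-2 slices; B ranks genres once, flattens every song into a (genre_rank, -plays, index) triple, sorts that whole list exactly once, and extracts the answer with a single counting sweep that keeps at most two songs per rank.
import Mathlib
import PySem

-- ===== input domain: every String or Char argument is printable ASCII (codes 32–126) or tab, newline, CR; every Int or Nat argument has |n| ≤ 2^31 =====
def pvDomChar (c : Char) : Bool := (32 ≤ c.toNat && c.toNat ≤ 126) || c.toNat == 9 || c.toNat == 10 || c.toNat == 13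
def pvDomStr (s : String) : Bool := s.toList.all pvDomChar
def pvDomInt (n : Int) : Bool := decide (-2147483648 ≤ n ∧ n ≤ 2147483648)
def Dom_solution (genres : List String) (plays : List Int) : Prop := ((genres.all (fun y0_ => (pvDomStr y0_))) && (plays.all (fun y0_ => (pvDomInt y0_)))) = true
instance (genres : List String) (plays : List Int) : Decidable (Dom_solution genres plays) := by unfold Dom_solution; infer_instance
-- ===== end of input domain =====

-- B replaces A's per-genre sorts by ONE global sort of (genre_rank, -play, index) triples
-- followed by a single counting sweep; equal cost, different decomposition (objective: alternative).

-- ===== PORT A =====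
-- 'genres[i]' / 'plays[i]' are ported with pyGetD (the default is never read under
-- Pre_solution, which excludes exactly the inputs where plays[i] raises IndexError).
def solution (genres : List String) (plays : List Int) : List Int :=
  let st := (PySem.List.pyRange 0 (PySem.List.len genres)).foldl
    (fun (st : PySem.Dict String (List (Int × Int)) × PySem.Dict String Int) i =>
      (st.1.modify (PySem.List.pyGetD genres i "") [] (fun l => l ++ [(PySem.List.pyGetD plays i 0, i)]),
       st.2.modify (PySem.List.pyGetD genres i "") 0 (fun t => t + PySem.List.pyGetD plays i 0)))
    (PySem.Dict.empty, PySem.Dict.empty)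
  let sortedGenres := PySem.List.sorted st.2.keys (fun x => st.2.getD x 0) true
  sortedGenres.foldl (fun answer genre =>
    (PySem.List.slice (PySem.List.sorted2 (st.1.getD genre []) (fun x => -x.1) (fun x => x.2)) none (some 2)).foldl
      (fun ans x => ans ++ [x.2]) answer) []

-- ===== PORT B =====
-- 'items.sort()': Python compares int triples lexicographically, so the sort is ported as the
-- (stable) sort by the lexicographic key on the triple — exact for every input.
def solution_alt (genres : List String) (plays : List Int) : List Int :=
  let totals := (genres.zip plays).foldl
    (fun (d : PySem.Dict String Int) gp => d.insert gp.1 (d.getD gp.1 0 + gp.2)) PySem.Dict.empty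
  let order := PySem.List.sorted totals.keys (fun g => totals.getD g 0) true
  let rank := order.zipIdx.foldl
    (fun (d : PySem.Dict String Int) rg => d.insert rg.1 (rg.2 : Int)) PySem.Dict.empty
  let items0 := (genres.zip plays).zipIdx.map (fun x => (rank.getD x.1.1 0, -x.1.2, (x.2 : Int)))
  let items := PySem.List.sorted items0 (fun t => toLex (t.1, toLex (t.2.1, t.2.2)))
  (items.foldl
    (fun (st : List Int × PySem.Dict Int Int) t =>
      let c := st.2.getD t.1 0
      if c < 2 then (st.1 ++ [t.2.2], st.2.insert t.1 (c + 1)) else st)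
    ([], PySem.Dict.empty)).1

-- ===== PRECONDITION & SPEC =====
-- Pre_ excludes exactly the inputs where A raises IndexError (plays shorter than genres).
def Pre_solution (genres : List String) (plays : List Int) : Prop :=
  genres.length ≤ plays.length
instance (genres : List String) (plays : List Int) : Decidable (Pre_solution genres plays) := by
  unfold Pre_solution; infer_instance
def pvWitness_solution : List String × List Int := (["pop", "rock", "pop"], [5, 3, 2])

def Spec_solution (genres : List String) (plays : List Int) (out : List Int) : Prop :=
  out = solution_alt genres plays
instance (genres : List String) (plays : List Int) (out : List Int) : Decidable (Spec_solution genres plays out) := by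
  unfold Spec_solution; infer_instance

-- ===== CLAIM (what is proved, stated in full; the proofs are below) =====
def Claim_equal_solution : Prop := ∀ (genres : List String) (plays : List Int), Dom_solution genres plays → Pre_solution genres plays → Spec_solution genres plays (solution genres plays)

-- ===== LEMMAS AND PROOFS =====

-- B's counting sweep, as the proof refers to it (definitionally equal to the fold body in solution_alt)
def pvStep (st : List Int × PySem.Dict Int Int) (t : Int × Int × Int) : List Int × PySem.Dict Int Int :=
  let c := st.2.getD t.1 0
  if c < 2 then (st.1 ++ [t.2.2], st.2.insert t.1 (c + 1)) else st

-- A's per-genre tuple sort is the sort by the lexicographic key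
theorem pv_sorted2_eq (xs : List (Int × Int)) :
    PySem.List.sorted2 xs (fun x => -x.1) (fun x => x.2)
      = PySem.List.sorted xs (fun x => toLex (-x.1, x.2)) := by
  simp only [PySem.List.sorted2, PySem.List.sorted, if_neg (by decide : ¬ (false = true))]
  congr 1
  funext acc x
  congr 1
  funext a b
  rcases lt_trichotomy (-a.1) (-b.1) with h | h | h <;>
    simp [Prod.Lex.toLex_lt_toLex, h, not_lt_of_gt]

theorem pv_getD_foldl_modify_add {κ β : Type} [BEq κ] [LawfulBEq κ] [DecidableEq κ]
    (l : List β) (key : β → κ) (val : β → Int) (d : PySem.Dict κ Int) (c : κ) :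
    (l.foldl (fun d x => d.modify (key x) 0 (fun t => t + val x)) d).getD c 0
      = d.getD c 0 + ((l.filter (fun x => key x == c)).map val).sum := by
  induction l generalizing d with
  | nil => simp
  | cons x t ih =>
    simp only [List.foldl_cons, ih, List.filter_cons]
    by_cases hx : key x = c
    · simp [hx]; ring
    · simp [hx, PySem.Dict.getD_modify, Ne.symm hx]

theorem pv_getD_foldl_insert_add {κ β : Type} [BEq κ] [LawfulBEq κ] [DecidableEq κ]
    (l : List β) (key : β → κ) (val : β → Int) (d : PySem.Dict κ Int) (c : κ) :
    (l.foldl (fun d x => d.insert (key x) (d.getD (key x) 0 + val x)) d).getD c 0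
      = d.getD c 0 + ((l.filter (fun x => key x == c)).map val).sum := by
  induction l generalizing d with
  | nil => simp
  | cons x t ih =>
    simp only [List.foldl_cons, ih, List.filter_cons]
    by_cases hx : key x = c
    · simp [hx]; ring
    · simp [hx, PySem.Dict.getD_insert, Ne.symm hx]

theorem pv_perm_flatten_filter {α κ : Type} [BEq κ] [LawfulBEq κ] (key : α → κ) :
    ∀ (gs : List κ) (l : List α), gs.Nodup → (∀ x ∈ l, key x ∈ gs) →
      ((gs.map (fun g => l.filter (fun x => key x == g))).flatten).Perm l := by
  intro gs
  induction gs with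
  | nil =>
    intro l _ hcov
    cases l with
    | nil => simp
    | cons x t => exact absurd (hcov x (by simp)) (by simp)
  | cons g gs' ih =>
    intro l hnd hcov
    simp only [List.map_cons, List.flatten_cons]
    have hstep : ((gs'.map (fun g' => l.filter (fun x => key x == g'))).flatten).Perm
        (l.filter (fun x => !(key x == g))) := by
      have hmapeq : gs'.map (fun g' => l.filter (fun x => key x == g'))
          = gs'.map (fun g' => (l.filter (fun x => !(key x == g))).filter (fun x => key x == g')) := by
        refine List.map_congr_left (fun g' hg' => ?_)
        rw [List.filter_filter]
        refine (List.filter_congr (fun x _hx => ?_)).symm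
        by_cases hk : key x = g'
        · have hgg : g' ≠ g := fun e => (List.nodup_cons.mp hnd).1 (e ▸ hg')
          simp [hk, hgg]
        · simp [hk]
      rw [hmapeq]
      exact ih (l.filter (fun x => !(key x == g))) (List.nodup_cons.mp hnd).2
        (fun x hx => by
          have hxl := List.mem_filter.mp hx
          have := hcov x hxl.1
          simp only [List.mem_cons] at this
          rcases this with hh | hh
          · exact absurd (by simp [hh] : (key x == g) = true) (by simpa using hxl.2)
          · exact hh)
    exact (hstep.append_left (l.filter (fun x => key x == g))).trans (List.filter_append_perm _ l)

theorem pv_flatten_perm {α β : Type} (l : List β) (F G : β → List α)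
    (h : ∀ g ∈ l, (F g).Perm (G g)) : (l.map F).flatten.Perm ((l.map G).flatten) := by
  induction l with
  | nil => simp
  | cons g t ih =>
    simp only [List.map_cons, List.flatten_cons]
    exact (h g (by simp)).append (ih (fun g' hg' => h g' (by simp [hg'])))

theorem pv_pass_getD (ts : List (Int × Int × Int)) :
    ∀ (st : List Int × PySem.Dict Int Int) (k : Int), k ∉ ts.map (fun t => t.1) →
      ((ts.foldl pvStep st).2).getD k 0 = st.2.getD k 0 := by
  induction ts with
  | nil => intro st k _; rfl
  | cons t ts ih =>
    intro st k hk
    simp only [List.map_cons, List.mem_cons, not_or] at hk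
    rw [List.foldl_cons, ih _ k (by simpa using hk.2)]
    by_cases hc : st.2.getD t.1 0 < 2 <;>
      simp [pvStep, hc, PySem.Dict.getD_insert_of_ne _ _ _ hk.1]

theorem pv_pass_skip (ts : List (Int × Int × Int)) (r : Int) :
    (∀ t ∈ ts, t.1 = r) → ∀ (acc : List Int) (d : PySem.Dict Int Int), d.getD r 0 = 2 →
      ts.foldl pvStep (acc, d) = (acc, d) := by
  induction ts with
  | nil => intro _ acc d _; rfl
  | cons t ts ih =>
    intro hall acc d h2
    have ht : t.1 = r := hall t (by simp)
    rw [List.foldl_cons]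
    have hstep : pvStep (acc, d) t = (acc, d) := by
      unfold pvStep
      simp [ht, h2]
    rw [hstep]
    exact ih (fun x hx => hall x (by simp [hx])) acc d h2

theorem pv_pass_block (b : List (Int × Int × Int)) (r : Int) (hb : ∀ x ∈ b, x.1 = r)
    (acc : List Int) (d : PySem.Dict Int Int) (h0 : d.getD r 0 = 0) :
    (b.foldl pvStep (acc, d)).1 = acc ++ (b.take 2).map (fun t => t.2.2) := by
  match b with
  | [] => simp
  | [x] =>
    have hx : x.1 = r := hb x (by simp)
    simp [pvStep, hx, h0]
  | x :: y :: rest =>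
    have hx : x.1 = r := hb x (by simp)
    have hy : y.1 = r := hb y (by simp)
    rw [List.foldl_cons, List.foldl_cons]
    have s1 : pvStep (acc, d) x = (acc ++ [x.2.2], d.insert r 1) := by
      simp [pvStep, hx, h0]
    have s2 : pvStep (acc ++ [x.2.2], d.insert r 1) y = (acc ++ [x.2.2] ++ [y.2.2], d.insert r 2) := by
      simp [pvStep, hy, PySem.Dict.getD_insert_self, PySem.Dict.insert_insert_self]
    rw [s1, s2, pv_pass_skip rest r (fun t ht => hb t (by simp [ht])) _ _
      (PySem.Dict.getD_insert_self _ _ _ _)]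
    simp

theorem pv_pass_blocks (Blk : String → List (Int × Int × Int)) (rk : String → Int) :
    ∀ (gs : List String) (acc : List Int) (d : PySem.Dict Int Int),
      (∀ g ∈ gs, ∀ x ∈ Blk g, x.1 = rk g) → gs.Pairwise (fun a b => rk a ≠ rk b) →
      (∀ g ∈ gs, d.getD (rk g) 0 = 0) →
      (((gs.map Blk).flatten).foldl pvStep (acc, d)).1
        = acc ++ (gs.map (fun g => ((Blk g).take 2).map (fun t => t.2.2))).flatten := by
  intro gs
  induction gs with
  | nil => intro acc d _ _ _; simp
  | cons g gs' ih =>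
    intro acc d hB hnd h0
    simp only [List.map_cons, List.flatten_cons, List.foldl_append]
    have hpair := List.pairwise_cons.mp hnd
    set st1 := (Blk g).foldl pvStep (acc, d) with hst1
    have h1 : st1.1 = acc ++ ((Blk g).take 2).map (fun t => t.2.2) :=
      pv_pass_block (Blk g) (rk g) (hB g (by simp)) acc d (h0 g (by simp))
    have h2 : ∀ g' ∈ gs', st1.2.getD (rk g') 0 = 0 := by
      intro g' hg'
      rw [hst1, pv_pass_getD]
      · exact h0 g' (by simp [hg'])
      · intro hmem
        rcases List.mem_map.mp hmem with ⟨x, hx, hx1⟩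
        exact hpair.1 g' hg' ((hB g (by simp) x hx).symm.trans hx1)
    have := ih st1.1 st1.2 (fun g' hg' => hB g' (by simp [hg'])) hpair.2 h2
    rw [show st1 = (st1.1, st1.2) from rfl] at this ⊢
    rw [this, h1]
    simp

theorem pv_sorted_pairwise_lt {α κ : Type} [LinearOrder κ] (xs : List α) (key : α → κ)
    (hinj : Function.Injective key) (hnd : xs.Nodup) :
    (PySem.List.sorted xs key).Pairwise (fun a b => key a < key b) := by
  have h1 := PySem.List.sorted_pairwise xs key
  have h2 : (PySem.List.sorted xs key).Nodup :=
    ((PySem.List.sorted_perm xs key false).nodup_iff).mpr hnd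
  have h3 : (PySem.List.sorted xs key).Pairwise (fun a b => a ≠ b) := h2
  exact (h1.and h3).imp (fun {a b} hab => lt_of_le_of_ne hab.1 (fun hk => hab.2 (hinj hk)))

theorem pv_foldl_range {β : Type} (gs : List String) (ps : List Int)
    (f : β → String → Int → Nat → β) (init : β) (h : gs.length ≤ ps.length) :
    (List.range gs.length).foldl (fun acc k => f acc (gs.getD k "") (ps.getD k 0) k) init
      = ((gs.zip ps).zipIdx).foldl (fun acc x => f acc x.1.1 x.1.2 x.2) init := by
  have hlen : (gs.zip ps).length = gs.length := by
    rw [List.length_zip]; omega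
  have main : ∀ n, n ≤ gs.length →
      (List.range n).foldl (fun acc k => f acc (gs.getD k "") (ps.getD k 0) k) init
        = (((gs.zip ps).zipIdx).take n).foldl (fun acc x => f acc x.1.1 x.1.2 x.2) init := by
    intro n hn
    induction n with
    | zero => simp
    | succ m ihm =>
      have hm : m ≤ gs.length := Nat.le_of_succ_le hn
      have hmz : m < (gs.zip ps).zipIdx.length := by
        rw [List.length_zipIdx, hlen]; omega
      have hmg : m < gs.length := hn
      have hmp : m < ps.length := by omega
      have hz : (gs.zip ps).zipIdx[m]'hmz = ((gs[m], ps[m]), m) := by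
        rw [List.getElem_zipIdx]; simp [List.getElem_zip]
      rw [List.range_succ, List.foldl_append, ihm hm,
        List.take_add_one, List.getElem?_eq_getElem hmz]
      simp only [Option.toList_some, List.foldl_append, List.foldl_cons, List.foldl_nil]
      rw [hz, List.getD_eq_getElem gs "" hmg, List.getD_eq_getElem ps 0 hmp]
  have := main gs.length (le_refl _)
  rwa [List.take_of_length_le (by rw [List.length_zipIdx, hlen])] at this

theorem pv_rank_getD (order : List String) (hnd : order.Nodup) (j : Nat) (hj : j < order.length) :
    ((order.zipIdx.foldl (fun (d : PySem.Dict String Int) rg => d.insert rg.1 (rg.2 : Int))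
        PySem.Dict.empty)).getD order[j] 0 = (j : Int) := by
  set D := order.zipIdx.foldl (fun (d : PySem.Dict String Int) rg => d.insert rg.1 (rg.2 : Int))
    PySem.Dict.empty with hD
  have hkeysnd : D.keys.Nodup := by
    rw [hD]
    exact PySem.Dict.nodup_keys_foldl_insert_key order.zipIdx (fun rg => rg.1) _ _
      PySem.Dict.nodup_keys_empty
  have hitems : D.items = [] ++ order.zipIdx.map (fun rg => (rg.1, (rg.2 : Int))) := by
    rw [hD]
    exact PySem.Dict.items_foldl_insert_fresh order.zipIdx (fun rg => rg.1) (fun rg => (rg.2 : Int))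
      PySem.Dict.empty (fun a _ => PySem.Dict.contains_empty _)
      (by rw [List.zipIdx_map_fst]; exact hnd)
  have hmem : (order[j], (j : Int)) ∈ D.items := by
    rw [hitems]
    simp only [List.nil_append]
    refine List.mem_map.mpr ⟨(order[j], j), ?_, rfl⟩
    have : order.zipIdx[j]'(by rw [List.length_zipIdx]; exact hj) = (order[j], j) := by
      rw [List.getElem_zipIdx]; simp
    rw [← this]
    exact List.getElem_mem _
  exact PySem.Dict.getD_of_mem_items D hmem hkeysnd 0

theorem pv_core (L : List ((String × Int) × Nat)) (hsnd : (L.map Prod.snd).Nodup)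
    (order : List String) (hnd : order.Nodup) (hcov : ∀ x ∈ L, x.1.1 ∈ order)
    (rk : String → Int) (hrk : order.Pairwise (fun a b => rk a < rk b)) :
    ((PySem.List.sorted (L.map (fun x => (rk x.1.1, -x.1.2, (x.2 : Int))))
        (fun t => toLex (t.1, toLex (t.2.1, t.2.2)))).foldl pvStep ([], PySem.Dict.empty)).1
      = (order.map (fun g =>
          ((PySem.List.sorted ((L.filter (fun x => x.1.1 == g)).map (fun x => (x.1.2, (x.2 : Int))))
              (fun x => toLex (-x.1, x.2))).take 2).map (fun x => x.2))).flatten := by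
  set grpf : String → List (Int × Int) :=
    fun g => (L.filter (fun x => x.1.1 == g)).map (fun x => (x.1.2, (x.2 : Int))) with hgrpf
  set Sg : String → List (Int × Int) :=
    fun g => PySem.List.sorted (grpf g) (fun x => toLex (-x.1, x.2)) with hSg
  set Blk : String → List (Int × Int × Int) :=
    fun g => (Sg g).map (fun y => (rk g, -y.1, y.2)) with hBlk
  set f : (String × Int) × Nat → Int × Int × Int := fun x => (rk x.1.1, -x.1.2, (x.2 : Int)) with hf
  have hinjG : Function.Injective (fun x : Int × Int => toLex (-x.1, x.2)) := by
    intro a b hab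
    simp only [toLex_inj, Prod.mk.injEq, neg_inj] at hab
    exact Prod.ext hab.1 hab.2
  have hgrpnd : ∀ g, (grpf g).Nodup := by
    intro g
    refine List.Nodup.of_map (fun y : Int × Int => y.2) ?_
    rw [hgrpf]
    simp only [List.map_map]
    have : ((fun y : Int × Int => y.2) ∘ fun x : (String × Int) × Nat => (x.1.2, (x.2 : Int)))
        = (fun n : Nat => (n : Int)) ∘ Prod.snd := rfl
    rw [this, ← List.map_map]
    exact ((hsnd.sublist (List.filter_sublist.map _)).map Nat.cast_injective)
  have hBfst : ∀ g, ∀ x ∈ Blk g, x.1 = rk g := by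
    intro g x hx
    rcases List.mem_map.mp hx with ⟨y, _, rfl⟩
    rfl
  -- the sorted global list is the concatenation of the per-genre sorted blocks
  have hitems : PySem.List.sorted (L.map f) (fun t => toLex (t.1, toLex (t.2.1, t.2.2)))
      = (order.map Blk).flatten := by
    refine PySem.List.sorted_eq_of_perm_of_pairwise_lt _ _ _ ?_ ?_
    · -- permutation
      have s1 : ∀ g ∈ order, (Blk g).Perm ((L.filter (fun x => x.1.1 == g)).map f) := by
        intro g _
        have p1 : (Blk g).Perm ((grpf g).map (fun y => (rk g, -y.1, y.2))) :=
          (PySem.List.sorted_perm (grpf g) _ false).map _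
        refine p1.trans (List.Perm.of_eq ?_)
        rw [hgrpf]
        simp only [List.map_map]
        refine List.map_congr_left (fun x hx => ?_)
        have : x.1.1 = g := by simpa using (List.mem_filter.mp hx).2
        simp [Function.comp, hf, this]
      have s2 := pv_flatten_perm order Blk (fun g => (L.filter (fun x => x.1.1 == g)).map f) s1
      have s3 : (order.map (fun g => (L.filter (fun x => x.1.1 == g)).map f)).flatten
          = ((order.map (fun g => L.filter (fun x => x.1.1 == g))).flatten).map f := by
        rw [List.map_flatten, List.map_map]; rfl
      have s4 := (pv_perm_flatten_filter (fun x => x.1.1) order L hnd hcov).map f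
      exact s2.trans ((List.Perm.of_eq s3).trans s4)
    · -- pairwise strictly increasing keys
      refine List.pairwise_flatten.mpr ⟨?_, ?_⟩
      · intro bl hbl
        rcases List.mem_map.mp hbl with ⟨g, _, rfl⟩
        rw [hBlk]
        refine List.pairwise_map.mpr ?_
        have h5 := pv_sorted_pairwise_lt (grpf g) (fun x => toLex (-x.1, x.2)) hinjG (hgrpnd g)
        have h6 : (Sg g).Pairwise (fun a b => toLex (-a.1, a.2) < toLex (-b.1, b.2)) := h5
        refine h6.imp (fun {a b} hab => ?_)
        exact Prod.Lex.toLex_lt_toLex.mpr (Or.inr ⟨rfl, hab⟩)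
      · refine List.pairwise_map.mpr (hrk.imp (fun {g1 g2} hlt x hx y hy => ?_))
        have hx1 : x.1 = rk g1 := hBfst g1 x hx
        have hy1 : y.1 = rk g2 := hBfst g2 y hy
        exact Prod.Lex.toLex_lt_toLex.mpr (Or.inl (by rw [hx1, hy1]; exact hlt))
  rw [hitems, pv_pass_blocks Blk rk order [] PySem.Dict.empty (fun g _ => hBfst g)
    (hrk.imp (fun {a b} hlt => ne_of_lt hlt)) (fun g _ => PySem.Dict.getD_empty _ _)]
  simp only [List.nil_append]
  refine congrArg List.flatten (List.map_congr_left (fun g _ => ?_))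
  rw [hBlk]
  simp only [← List.map_take, List.map_map]
  rfl

theorem pv_main (gs : List String) (ps : List Int) (h : gs.length ≤ ps.length) :
    solution gs ps = solution_alt gs ps := by
  simp only [solution, solution_alt]
  have e0 : PySem.List.pyRange 0 (PySem.List.len gs) = (List.range gs.length).map (fun (k : Nat) => (k : Int)) :=
    PySem.List.pyRange_zero_natCast gs.length
  rw [e0, List.foldl_map]
  simp only [PySem.List.pyGetD_natCast]
  have e1 : (List.range gs.length).foldl
      (fun (st : PySem.Dict String (List (Int × Int)) × PySem.Dict String Int) k =>
        (st.1.modify (gs.getD k "") [] fun l => l ++ [(ps.getD k 0, (k : Int))],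
         st.2.modify (gs.getD k "") 0 fun t => t + ps.getD k 0))
      (PySem.Dict.empty, PySem.Dict.empty)
      = ((gs.zip ps).zipIdx).foldl
          (fun st x =>
            (st.1.modify x.1.1 [] fun l => l ++ [(x.1.2, (x.2 : Int))],
             st.2.modify x.1.1 0 fun t => t + x.1.2))
          (PySem.Dict.empty, PySem.Dict.empty) :=
    pv_foldl_range gs ps
      (fun st g p k => (st.1.modify g [] fun l => l ++ [(p, (k : Int))],
        st.2.modify g 0 fun t => t + p))
      (PySem.Dict.empty, PySem.Dict.empty) h
  have e2 : ((gs.zip ps).zipIdx).foldl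
      (fun (st : PySem.Dict String (List (Int × Int)) × PySem.Dict String Int) x =>
        (st.1.modify x.1.1 [] fun l => l ++ [(x.1.2, (x.2 : Int))],
         st.2.modify x.1.1 0 fun t => t + x.1.2))
      (PySem.Dict.empty, PySem.Dict.empty)
      = (((gs.zip ps).zipIdx).foldl
          (fun d x => d.modify x.1.1 [] fun l => l ++ [(x.1.2, (x.2 : Int))]) PySem.Dict.empty,
         ((gs.zip ps).zipIdx).foldl
          (fun d x => d.modify x.1.1 0 fun t => t + x.1.2) PySem.Dict.empty) :=
    PySem.List.foldl_prod_mk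
      (fun (d : PySem.Dict String (List (Int × Int))) (x : (String × Int) × Nat) =>
        d.modify x.1.1 [] fun l => l ++ [(x.1.2, (x.2 : Int))])
      (fun (d : PySem.Dict String Int) (x : (String × Int) × Nat) =>
        d.modify x.1.1 0 fun t => t + x.1.2) _ _ _
  rw [e1, e2]
  dsimp only
  -- per-genre sums: A's play_dic and B's totals compute the same key function
  have hmap : ((gs.zip ps).zipIdx).map (fun x => x.1.1) = (gs.zip ps).map (fun y => y.1) := by
    conv_rhs => rw [← List.zipIdx_map_fst 0 (gs.zip ps)]
    rw [List.map_map]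
    rfl
  have hfm : ∀ g : String, ((gs.zip ps).filter (fun y => y.1 == g)).map (fun y => y.2)
      = (((gs.zip ps).zipIdx).filter (fun x => x.1.1 == g)).map (fun x => x.1.2) := by
    intro g
    conv_lhs => rw [← List.zipIdx_map_fst 0 (gs.zip ps)]
    rw [List.filter_map, List.map_map]
    rfl
  have hpd : (fun x => (((gs.zip ps).zipIdx).foldl
        (fun d x => d.modify x.1.1 0 fun t => t + x.1.2) PySem.Dict.empty).getD x 0)
      = fun g => ((((gs.zip ps).zipIdx).filter (fun x => x.1.1 == g)).map (fun x => x.1.2)).sum :=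
    funext (fun g => by
      simpa using pv_getD_foldl_modify_add ((gs.zip ps).zipIdx)
        (fun x => x.1.1) (fun x => x.1.2) PySem.Dict.empty g)
  have htot : (fun g => ((gs.zip ps).foldl
        (fun d gp => d.insert gp.1 (d.getD gp.1 0 + gp.2)) PySem.Dict.empty).getD g 0)
      = fun g => ((((gs.zip ps).zipIdx).filter (fun x => x.1.1 == g)).map (fun x => x.1.2)).sum :=
    funext (fun g => by
      have h1 := pv_getD_foldl_insert_add (gs.zip ps) (fun y => y.1) (fun y => y.2) PySem.Dict.empty g
      rw [hfm g] at h1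
      simpa using h1)
  have hupd : ∀ m : List String, PySem.Set.update [] m = PySem.Set.ofList m := by
    intro m; rw [PySem.Set.ofList_eq_foldl]; rfl
  have hpdk : (((gs.zip ps).zipIdx).foldl
        (fun d x => d.modify x.1.1 0 fun t => t + x.1.2) PySem.Dict.empty).keys
      = PySem.Set.ofList ((gs.zip ps).map (fun y => y.1)) := by
    have h1 : (((gs.zip ps).zipIdx).foldl
          (fun d x => d.modify x.1.1 0 fun t => t + x.1.2) PySem.Dict.empty).keys
        = PySem.Set.update PySem.Dict.empty.keys (((gs.zip ps).zipIdx).map (fun x => x.1.1)) :=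
      PySem.Dict.keys_foldl_modify_key _ _ _ _ _
    rw [h1, PySem.Dict.keys_empty, hmap, hupd]
  have htotk : ((gs.zip ps).foldl
        (fun d gp => d.insert gp.1 (d.getD gp.1 0 + gp.2)) PySem.Dict.empty).keys
      = PySem.Set.ofList ((gs.zip ps).map (fun y => y.1)) := by
    have h1 : ((gs.zip ps).foldl
          (fun d gp => d.insert gp.1 (d.getD gp.1 0 + gp.2)) PySem.Dict.empty).keys
        = PySem.Set.update PySem.Dict.empty.keys ((gs.zip ps).map (fun y => y.1)) :=
      PySem.Dict.keys_foldl_insert_key _ _ _ _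
    rw [h1, PySem.Dict.keys_empty, hupd]
  rw [hpd, htot, hpdk, htotk]
  -- A's grouping dict reads back the filtered indexed songs
  have hdic : ∀ g : String, (((gs.zip ps).zipIdx).foldl
        (fun d x => d.modify x.1.1 [] fun l => l ++ [(x.1.2, (x.2 : Int))]) PySem.Dict.empty).getD g []
      = (((gs.zip ps).zipIdx).filter (fun x => x.1.1 == g)).map (fun x => (x.1.2, (x.2 : Int))) := by
    intro g
    have h1 : (((gs.zip ps).zipIdx).foldl
          (fun d x => d.modify x.1.1 [] fun l => l ++ [(x.1.2, (x.2 : Int))]) PySem.Dict.empty)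
        = ((((gs.zip ps).zipIdx).map (fun x => (x.1.1, (x.1.2, (x.2 : Int))))).foldl
            (fun d p => d.modify p.1 [] fun l => l ++ [p.2]) PySem.Dict.empty) :=
      (List.foldl_map (f := fun x : (String × Int) × Nat => (x.1.1, (x.1.2, (x.2 : Int))))
        (g := fun (d : PySem.Dict String (List (Int × Int))) p => d.modify p.1 [] fun l => l ++ [p.2])).symm
    rw [h1, PySem.Dict.getD_foldl_modify_append, List.filter_map, List.map_map]
    rfl
  have hslice : ∀ xs : List (Int × Int), PySem.List.slice xs none (some 2) = xs.take 2 := by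
    intro xs
    simpa using PySem.List.slice_to xs (by norm_num : (0 : Int) ≤ 2)
  simp only [hdic, pv_sorted2_eq, hslice, PySem.List.foldl_append_singleton_eq_map]
  simp only [PySem.List.foldl_append_eq_flatMap, List.nil_append, List.flatMap_def]
  -- facts feeding the core lemma
  have hsnd : (((gs.zip ps).zipIdx).map Prod.snd).Nodup := by
    rw [List.zipIdx_map_snd]
    exact List.nodup_range'
  have hnd : (PySem.List.sorted (PySem.Set.ofList ((gs.zip ps).map (fun y => y.1)))
      (fun g => ((((gs.zip ps).zipIdx).filter (fun x => x.1.1 == g)).map (fun x => x.1.2)).sum)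
      true).Nodup :=
    (PySem.List.sorted_perm _ _ _).nodup_iff.mpr (PySem.Set.nodup_ofList _)
  have hcov : ∀ x ∈ (gs.zip ps).zipIdx, x.1.1 ∈ PySem.List.sorted
      (PySem.Set.ofList ((gs.zip ps).map (fun y => y.1)))
      (fun g => ((((gs.zip ps).zipIdx).filter (fun x => x.1.1 == g)).map (fun x => x.1.2)).sum)
      true := by
    intro x hx
    refine (PySem.List.sorted_perm _ _ _).mem_iff.mpr ((PySem.Set.mem_ofList _ _).mpr ?_)
    have h1 : x.1 ∈ gs.zip ps := by
      rw [← List.zipIdx_map_fst 0 (gs.zip ps)]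
      exact List.mem_map_of_mem hx
    exact List.mem_map_of_mem h1
  have hrk : (PySem.List.sorted (PySem.Set.ofList ((gs.zip ps).map (fun y => y.1)))
      (fun g => ((((gs.zip ps).zipIdx).filter (fun x => x.1.1 == g)).map (fun x => x.1.2)).sum)
      true).Pairwise (fun a b =>
        (fun g => ((PySem.List.sorted (PySem.Set.ofList ((gs.zip ps).map (fun y => y.1)))
            (fun g => ((((gs.zip ps).zipIdx).filter (fun x => x.1.1 == g)).map (fun x => x.1.2)).sum)
            true).zipIdx.foldl (fun (d : PySem.Dict String Int) rg => d.insert rg.1 (rg.2 : Int))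
            PySem.Dict.empty).getD g 0) a
        < (fun g => ((PySem.List.sorted (PySem.Set.ofList ((gs.zip ps).map (fun y => y.1)))
            (fun g => ((((gs.zip ps).zipIdx).filter (fun x => x.1.1 == g)).map (fun x => x.1.2)).sum)
            true).zipIdx.foldl (fun (d : PySem.Dict String Int) rg => d.insert rg.1 (rg.2 : Int))
            PySem.Dict.empty).getD g 0) b) := by
    refine List.pairwise_iff_getElem.mpr (fun i j hi hj hij => ?_)
    have r1 := pv_rank_getD _ hnd i hi
    have r2 := pv_rank_getD _ hnd j hj
    simp only []
    rw [r1, r2]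
    exact_mod_cast hij
  exact (pv_core ((gs.zip ps).zipIdx) hsnd _ hnd hcov _ hrk).symm

-- ===== VERDICT (by name: the statement is the Claim_ definition above) =====
theorem solution_spec : Claim_equal_solution := by
  intro genres plays _hdom hpre
  unfold Spec_solution
  exact pv_main genres plays hpre
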